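-- pv_equiv track=rewrite | github.com/chriskaschner/tublemetry | tests/test_status_bits.py | _simulate_publish
-- ===== SOURCE A (Python) =====
-- def _simulate_publish(initial_last: int, values: list[bool]) -> list[bool]:
--     """Simulate the C++ publish-on-change loop, returning published values."""
--     published = []
--     last = initial_last
--     for v in values:
--         new_last = 1 if v else 0
--         if new_last != last:
--             last = new_last
--             published.append(v)
--     return published
-- ===== SOURCE B (Python) =====
-- def _simulate_publish(initial_last: int, values: list[bool]) -> list[bool]:
--     """Stateless pairwise formulation: A's tracked `last` after element i always
--     equals the 0/1 key of element i (publishing sets it; not publishing means it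
--     was already equal), so an element is published exactly when its 0/1 key
--     differs from its predecessor's key, with initial_last before the first.
--     Hence a comprehension over the list zipped with its shifted key list."""
--     keys = [1 if v else 0 for v in values]
--     prevs = [initial_last] + keys[:-1]
--     return [v for v, k, p in zip(values, keys, prevs) if k != p]
-- ===== Notes on version B (the rewrite author's own statement) =====
-- stated objective: alternative
-- what changed: B is stateless: it exploits that A's tracked last state always equals the previous element's 0/1 key, so it zips the list with its shifted key list and keeps each element whose key differs from its predecessor's (initial_last before the first), replacing A's running-state loop with a pairwise comparison comprehension.
import Mathlib
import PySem

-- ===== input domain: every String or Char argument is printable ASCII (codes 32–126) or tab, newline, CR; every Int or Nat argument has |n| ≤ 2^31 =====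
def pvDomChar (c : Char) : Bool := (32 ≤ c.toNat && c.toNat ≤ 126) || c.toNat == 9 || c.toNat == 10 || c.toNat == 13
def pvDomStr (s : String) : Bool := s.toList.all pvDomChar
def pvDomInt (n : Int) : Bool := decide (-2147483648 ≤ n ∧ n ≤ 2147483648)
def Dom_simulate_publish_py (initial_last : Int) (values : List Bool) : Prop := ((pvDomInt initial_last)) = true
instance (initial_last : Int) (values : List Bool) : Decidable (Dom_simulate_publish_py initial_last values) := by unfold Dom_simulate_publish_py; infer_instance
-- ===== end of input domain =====

-- B replaces A's stateful running-`last` loop by a stateless pairwise pass: each element is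
-- kept iff its 0/1 key differs from its predecessor's key (initial_last before the first).

-- ===== PORT A =====
def simulate_publish_py (initial_last : Int) (values : List Bool) : List Bool :=
  (values.foldl (fun (st : Int × List Bool) v =>
      let new_last : Int := if v then 1 else 0
      if new_last ≠ st.1 then (new_last, st.2 ++ [v]) else st)
    (initial_last, [])).2

-- ===== PORT B =====
-- keys = [1 if v else 0 for v in values]; prevs = [initial_last] + keys[:-1];
-- [v for v, k, p in zip(values, keys, prevs) if k != p]
def simulate_publish_py_alt (initial_last : Int) (values : List Bool) : List Bool :=
  let keys : List Int := values.map (fun v => if v then 1 else 0)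
  let prevs : List Int := initial_last :: keys.dropLast
  ((values.zip (keys.zip prevs)).filter (fun vp => vp.2.1 != vp.2.2)).map (fun vp => vp.1)

-- ===== PRECONDITION & SPEC =====
def Spec_simulate_publish_py (initial_last : Int) (values : List Bool) (out : List Bool) : Prop := out = simulate_publish_py_alt initial_last values
instance (initial_last : Int) (values : List Bool) (out : List Bool) : Decidable (Spec_simulate_publish_py initial_last values out) := by unfold Spec_simulate_publish_py; infer_instance

-- ===== CLAIM (what is proved, stated in full; the proofs are below) =====
def Claim_equal_simulate_publish_py : Prop := ∀ (initial_last : Int) (values : List Bool), Dom_simulate_publish_py initial_last values → Spec_simulate_publish_py initial_last values (simulate_publish_py initial_last values)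

-- ===== LEMMAS AND PROOFS =====

-- common recursive characterisation: publish v iff key v ≠ last, then continue with last := key v
def pvSpecRec (last : Int) : List Bool → List Bool
  | [] => []
  | v :: t =>
      if (if v then (1:Int) else 0) ≠ last
      then v :: pvSpecRec (if v then 1 else 0) t
      else pvSpecRec (if v then 1 else 0) t

-- A's fold, from any state, appends pvSpecRec to the accumulator
theorem pvFold_eq (values : List Bool) : ∀ (last : Int) (acc : List Bool),
    (values.foldl (fun (st : Int × List Bool) v =>
        let new_last : Int := if v then 1 else 0
        if new_last ≠ st.1 then (new_last, st.2 ++ [v]) else st)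
      (last, acc)).2 = acc ++ pvSpecRec last values := by
  induction values with
  | nil => intro last acc; simp [pvSpecRec]
  | cons v t ih =>
    intro last acc
    by_cases h : (if v then (1:Int) else 0) = last
    · simp only [List.foldl_cons, pvSpecRec, h]
      rw [ih]; simp
    · simp only [List.foldl_cons, if_pos h, pvSpecRec]
      rw [ih]; simp

-- B's zip/filter/map pass equals the same recursion
theorem pvZip_eq (t : List Bool) : ∀ (last : Int),
    ((t.zip ((t.map (fun v => if v then (1:Int) else 0)).zip
        (last :: (t.map (fun v => if v then (1:Int) else 0)).dropLast))).filter
      (fun vp => vp.2.1 != vp.2.2)).map (fun vp => vp.1) = pvSpecRec last t := by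
  induction t with
  | nil => intro last; rfl
  | cons v r ih =>
    intro last
    cases r with
    | nil =>
      by_cases h : (if v then (1:Int) else 0) = last <;>
        simp [pvSpecRec, h, List.filter, bne]
    | cons w s =>
      simp only [List.map_cons, List.dropLast_cons₂, List.zip_cons_cons, List.filter_cons]
      simp only [List.map_cons, List.zip_cons_cons, List.filter_cons] at ih
      by_cases h : (if v then (1:Int) else 0) = last
      · simpa [pvSpecRec, h, bne] using ih (if v then 1 else 0)
      · simpa [pvSpecRec, h, bne] using ih (if v then 1 else 0)

theorem pvAlt_eq (last : Int) (values : List Bool) :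
    simulate_publish_py_alt last values = pvSpecRec last values := by
  simpa only [simulate_publish_py_alt] using pvZip_eq values last

-- ===== VERDICT (by name: the statement is the Claim_ definition above) =====
theorem simulate_publish_py_spec : Claim_equal_simulate_publish_py := by
  intro initial_last values _
  unfold Spec_simulate_publish_py simulate_publish_py
  rw [pvFold_eq, pvAlt_eq]; simp
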